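-- pv_equiv track=rewrite | github.com/uho-33/scrollshot2pdf | image_to_pdf.py | calculate_slices
-- ===== SOURCE A (Python) =====
-- from typing import Tuple, List
--
-- def calculate_slices(image_height: int, page_height: int, content_gaps: List[int]) -> List[Tuple[int, int]]:
--     """
--     Calculate optimal slice positions based on page height and content gaps.
--     Returns list of (start_y, end_y) tuples.
--     """
--     slices = []
--     current_pos = 0
--
--     while current_pos < image_height:
--         # Calculate ideal next slice position
--         ideal_next_pos = min(current_pos + page_height, image_height)
--
--         # If we're at the end, add the final slice
--         if ideal_next_pos >= image_height:
--             slices.append((current_pos, image_height))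
--             break
--
--         # Find nearest content gap
--         nearest_gap = None
--         min_distance = page_height // 4  # Don't look for gaps too far from ideal position
--
--         for gap in content_gaps:
--             if gap > current_pos and gap < ideal_next_pos:
--                 distance = abs(gap - ideal_next_pos)
--                 if distance < min_distance:
--                     nearest_gap = gap
--                     min_distance = distance
--
--         # Use gap position if found, otherwise use ideal position
--         next_pos = nearest_gap if nearest_gap is not None else ideal_next_pos
--         slices.append((current_pos, next_pos))
--         current_pos = next_pos
--
--     return slices
-- ===== SOURCE B (Python) =====
-- def _bisect_left(a, x):
--     lo = 0
--     hi = len(a)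
--     while lo < hi:
--         mid = (lo + hi) // 2
--         if a[mid] < x:
--             lo = mid + 1
--         else:
--             hi = mid
--     return lo
--
--
-- def calculate_slices(image_height, page_height, content_gaps):
--     gaps = sorted(content_gaps)
--     limit = page_height // 4
--     slices = []
--     pos = 0
--     while pos < image_height:
--         ideal = pos + page_height
--         if ideal >= image_height:
--             slices.append((pos, image_height))
--             return slices
--         i = _bisect_left(gaps, ideal)
--         nxt = ideal
--         if i > 0:
--             g = gaps[i - 1]
--             if g > pos and g > ideal - limit:
--                 nxt = g
--         slices.append((pos, nxt))
--         pos = nxt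
--     return slices
-- ===== Notes on version B (the rewrite author's own statement) =====
-- stated objective: alternative
-- what changed: B sorts content_gaps once and per slice binary-searches the largest gap below the ideal cut instead of rescanning the whole gap list for every slice.
import Mathlib
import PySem

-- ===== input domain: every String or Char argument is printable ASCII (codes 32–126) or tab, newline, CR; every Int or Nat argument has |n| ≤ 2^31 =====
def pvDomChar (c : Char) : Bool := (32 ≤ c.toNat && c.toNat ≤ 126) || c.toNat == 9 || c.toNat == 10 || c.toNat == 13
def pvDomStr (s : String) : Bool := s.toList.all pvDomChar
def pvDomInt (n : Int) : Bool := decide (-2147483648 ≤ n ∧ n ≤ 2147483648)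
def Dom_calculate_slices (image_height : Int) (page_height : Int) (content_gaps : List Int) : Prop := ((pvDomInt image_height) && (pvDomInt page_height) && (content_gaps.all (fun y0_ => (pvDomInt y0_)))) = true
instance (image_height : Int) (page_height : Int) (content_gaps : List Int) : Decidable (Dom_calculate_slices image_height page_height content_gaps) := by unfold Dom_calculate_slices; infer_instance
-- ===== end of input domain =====

-- B sorts the gaps once and binary-searches the largest in-window gap per slice instead of
-- rescanning every gap for every slice (objective: alternative algorithm, same return value).

-- ===== PORT A =====
-- the inner `for gap in content_gaps` loop: state = (nearest_gap, min_distance)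
def pvScanA (content_gaps : List Int) (current_pos ideal_next_pos min_distance0 : Int) :
    Option Int × Int :=
  content_gaps.foldl
    (fun st gap =>
      if gap > current_pos ∧ gap < ideal_next_pos then
        let distance := |gap - ideal_next_pos|
        if distance < st.2 then (some gap, distance) else st
      else st)
    (none, min_distance0)

-- the outer `while current_pos < image_height` loop (fuel = enough iterations; each
-- iteration advances current_pos by at least 1 whenever page_height > 0)
def pvLoopA (image_height page_height : Int) (content_gaps : List Int) :
    Nat → Int → List (Int × Int) → List (Int × Int)
  | 0, _, slices => slices
  | fuel + 1, current_pos, slices =>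
    if current_pos < image_height then
      let ideal_next_pos := min (current_pos + page_height) image_height
      if ideal_next_pos ≥ image_height then slices ++ [(current_pos, image_height)]
      else
        let st := pvScanA content_gaps current_pos ideal_next_pos
          (PySem.Int.floordiv page_height 4)
        let next_pos := match st.1 with
          | some g => g
          | none => ideal_next_pos
        pvLoopA image_height page_height content_gaps fuel next_pos
          (slices ++ [(current_pos, next_pos)])
    else slices

def calculate_slices (image_height : Int) (page_height : Int) (content_gaps : List Int) : List (Int × Int) :=
  pvLoopA image_height page_height content_gaps (image_height.toNat + 1) 0 []

-- ===== PORT B =====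
-- hand-written _bisect_left of Source B (while lo < hi: mid = (lo+hi)//2 …), transliterated
def pvBisectAux (a : List Int) (x lo hi : Int) : Int :=
  if h : lo < hi then
    let mid := PySem.Int.floordiv (lo + hi) 2
    match PySem.List.pyGet? a mid with
    | some v =>
        if v < x then pvBisectAux a x (mid + 1) hi else pvBisectAux a x lo mid
    | none => lo   -- unreachable: 0 ≤ lo ≤ mid < hi ≤ len is maintained by the caller
  else lo
termination_by (hi - lo).toNat
decreasing_by
  · have h1 : lo * 2 ≤ lo + hi := by omega
    have := (PySem.Int.le_floordiv_iff_mul_le (a := lo + hi) (b := 2) (q := lo) (by omega)).mpr h1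
    omega
  · have h2 : lo + hi < hi * 2 := by omega
    have := (PySem.Int.floordiv_lt_iff_lt_mul (a := lo + hi) (b := 2) (q := hi) (by omega)).mpr h2
    omega

def pvBisectLeft (a : List Int) (x : Int) : Int :=
  pvBisectAux a x 0 (a.length : Int)

def pvLoopB (image_height page_height : Int) (gaps : List Int) (limit : Int) :
    Nat → Int → List (Int × Int) → List (Int × Int)
  | 0, _, slices => slices
  | fuel + 1, pos, slices =>
    if pos < image_height then
      let ideal := pos + page_height
      if ideal ≥ image_height then slices ++ [(pos, image_height)]
      else
        let i := pvBisectLeft gaps ideal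
        let nxt :=
          if i > 0 then
            match PySem.List.pyGet? gaps (i - 1) with
            | some g => if g > pos ∧ g > ideal - limit then g else ideal
            | none => ideal
          else ideal
        pvLoopB image_height page_height gaps limit fuel nxt (slices ++ [(pos, nxt)])
    else slices

def calculate_slices_alt (image_height : Int) (page_height : Int) (content_gaps : List Int) : List (Int × Int) :=
  pvLoopB image_height page_height
    (PySem.List.sorted content_gaps (fun g => g) false)
    (PySem.Int.floordiv page_height 4)
    (image_height.toNat + 1) 0 []

-- ===== PRECONDITION & SPEC =====
def Spec_calculate_slices (image_height : Int) (page_height : Int) (content_gaps : List Int) (out : List (Int × Int)) : Prop := out = calculate_slices_alt image_height page_height content_gaps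
instance (image_height : Int) (page_height : Int) (content_gaps : List Int) (out : List (Int × Int)) : Decidable (Spec_calculate_slices image_height page_height content_gaps out) := by unfold Spec_calculate_slices; infer_instance

-- ===== CLAIM (what is proved, stated in full; the proofs are below) =====
def Claim_equal_calculate_slices : Prop := ∀ (image_height : Int) (page_height : Int) (content_gaps : List Int), Dom_calculate_slices image_height page_height content_gaps → Spec_calculate_slices image_height page_height content_gaps (calculate_slices image_height page_height content_gaps)

-- ===== LEMMAS AND PROOFS =====

-- helper for the proofs: pvScanA's foldl with an arbitrary start state
def pvGo (pos ideal : Int) (l : List Int) (st : Option Int × Int) : Option Int × Int :=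
  l.foldl
    (fun st gap =>
      if gap > pos ∧ gap < ideal then
        let distance := |gap - ideal|
        if distance < st.2 then (some gap, distance) else st
      else st)
    st

theorem pvGo_char (pos ideal v0 : Int) (l : List Int) : ∀ (b : Option Int),
    (pvGo pos ideal l (b, ideal - b.getD v0)).1 =
      (if (l.filter (fun g => decide (pos < g ∧ g < ideal))).foldl max (b.getD v0) = b.getD v0
       then b
       else some ((l.filter (fun g => decide (pos < g ∧ g < ideal))).foldl max (b.getD v0))) := by
  induction l with
  | nil => intro b; simp [pvGo]
  | cons g t ih =>
    intro b
    by_cases hc : g > pos ∧ g < ideal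
    · have hd : |g - ideal| = ideal - g := by
        rw [abs_of_neg (by omega : g - ideal < 0)]; ring
      by_cases hlt : b.getD v0 < g
      · have h1 : pvGo pos ideal (g :: t) (b, ideal - b.getD v0)
            = pvGo pos ideal t (some g, ideal - (some g).getD v0) := by
          simp [pvGo, hc, hd, hlt, show ideal - g < ideal - b.getD v0 by omega]
        rw [h1, ih (some g)]
        have hf : (g :: t).filter (fun g => decide (pos < g ∧ g < ideal))
            = g :: t.filter (fun g => decide (pos < g ∧ g < ideal)) := by
          simp [List.filter_cons, hc.1, hc.2]
        rw [hf]
        have hmax : max (b.getD v0) g = g := by omega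
        simp only [List.foldl_cons, hmax, Option.getD_some]
        have hge := (PySem.List.le_foldl_max (t.filter (fun g => decide (pos < g ∧ g < ideal))) g).1
        split_ifs with h1 h2
        · omega
        · rw [h1]
        · omega
        · rfl
      · have h1 : pvGo pos ideal (g :: t) (b, ideal - b.getD v0)
            = pvGo pos ideal t (b, ideal - b.getD v0) := by
          simp [pvGo, hc, hd, show ¬(ideal - g < ideal - b.getD v0) by omega]
        rw [h1, ih b]
        have hf : (g :: t).filter (fun g => decide (pos < g ∧ g < ideal))
            = g :: t.filter (fun g => decide (pos < g ∧ g < ideal)) := by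
          simp [List.filter_cons, hc.1, hc.2]
        rw [hf]
        have hmax : max (b.getD v0) g = b.getD v0 := by omega
        simp only [List.foldl_cons, hmax]
    · have h1 : pvGo pos ideal (g :: t) (b, ideal - b.getD v0)
          = pvGo pos ideal t (b, ideal - b.getD v0) := by
        simp [pvGo, hc]
      have hf : (g :: t).filter (fun g => decide (pos < g ∧ g < ideal))
          = t.filter (fun g => decide (pos < g ∧ g < ideal)) := by
        rcases not_and_or.mp hc with h | h <;> simp [List.filter_cons] <;> omega
      rw [h1, ih b, hf]

theorem pvBisect_inv (a : List Int) (x : Int) (hs : a.Pairwise (· ≤ ·)) :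
    ∀ (n : Nat) (lo hi : Int), (hi - lo).toNat ≤ n → 0 ≤ lo → lo ≤ hi → hi ≤ (a.length : Int) →
    (∀ (j : Nat) (hj : j < a.length), (j : Int) < lo → a[j] < x) →
    (∀ (j : Nat) (hj : j < a.length), hi ≤ (j : Int) → x ≤ a[j]) →
    lo ≤ pvBisectAux a x lo hi ∧ pvBisectAux a x lo hi ≤ hi ∧
      (∀ (j : Nat) (hj : j < a.length), (j : Int) < pvBisectAux a x lo hi → a[j] < x) ∧
      (∀ (j : Nat) (hj : j < a.length), pvBisectAux a x lo hi ≤ (j : Int) → x ≤ a[j]) := by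
  intro n
  induction n with
  | zero =>
    intro lo hi hn h0 hlh hlen hbelow habove
    have heq : lo = hi := by omega
    rw [pvBisectAux]
    simp only [show ¬(lo < hi) by omega, dif_neg, not_false_iff]
    exact ⟨le_refl _, by omega, fun j hj hjlo => hbelow j hj hjlo,
      fun j hj hjlo => habove j hj (by omega)⟩
  | succ n ih =>
    intro lo hi hn h0 hlh hlen hbelow habove
    by_cases hlt : lo < hi
    · set mid := PySem.Int.floordiv (lo + hi) 2 with hmid
      have hmlo : lo ≤ mid := by
        have h1 : lo * 2 ≤ lo + hi := by omega
        exact (PySem.Int.le_floordiv_iff_mul_le (a := lo + hi) (b := 2) (q := lo) (by omega)).mpr h1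
      have hmhi : mid < hi := by
        have h2 : lo + hi < hi * 2 := by omega
        exact (PySem.Int.floordiv_lt_iff_lt_mul (a := lo + hi) (b := 2) (q := hi) (by omega)).mpr h2
      have hmr : mid.toNat < a.length := by omega
      have hget : PySem.List.pyGet? a mid = some a[mid.toNat] :=
        PySem.List.pyGet?_eq_some_getElem a (by omega) (by omega)
      have hmono : ∀ (p q : Nat) (hp : p < a.length) (hq : q < a.length), p ≤ q → a[p] ≤ a[q] := by
        intro p q hp hq hpq
        rcases eq_or_lt_of_le hpq with h | h
        · subst h; exact le_refl _
        · exact (List.pairwise_iff_getElem.mp hs) p q hp hq h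
      rw [pvBisectAux]
      simp only [dif_pos hlt, ← hmid, hget]
      by_cases hv : a[mid.toNat] < x
      · simp only [if_pos hv]
        obtain ⟨h1, h2, h3, h4⟩ := ih (mid + 1) hi (by omega) (by omega) (by omega) hlen
          (by
            intro j hj hjlo
            have hjm : j ≤ mid.toNat := by omega
            exact lt_of_le_of_lt (hmono j mid.toNat (by omega) hmr hjm) hv)
          habove
        exact ⟨by omega, h2, h3, h4⟩
      · simp only [if_neg hv]
        obtain ⟨h1, h2, h3, h4⟩ := ih lo mid (by omega) (by omega) (by omega) (by omega)
          hbelow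
          (by
            intro j hj hjhi
            have hjm : mid.toNat ≤ j := by omega
            exact le_trans (by omega) (hmono mid.toNat j hmr hj hjm))
        exact ⟨h1, by omega, h3, h4⟩
    · rw [pvBisectAux]
      simp only [dif_neg hlt]
      exact ⟨le_refl _, by omega, fun j hj hjlo => hbelow j hj hjlo,
        fun j hj hjlo => habove j hj (by omega)⟩

theorem pv_step_eq (gaps : List Int) (pos ideal limit : Int) :
    (match (pvScanA gaps pos ideal limit).1 with
      | some g => g
      | none => ideal) =
    (let xs := PySem.List.sorted gaps (fun g => g) false
     let i := pvBisectLeft xs ideal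
     if i > 0 then
        match PySem.List.pyGet? xs (i - 1) with
        | some g => if g > pos ∧ g > ideal - limit then g else ideal
        | none => ideal
      else ideal) := by
  set xs := PySem.List.sorted gaps (fun g => g) false with hxs
  have hpair : xs.Pairwise (· ≤ ·) := PySem.List.sorted_pairwise gaps (fun g => g)
  have hmemx : ∀ g, g ∈ xs ↔ g ∈ gaps := fun g => PySem.List.mem_sorted gaps (fun g => g) false g
  obtain ⟨hi0, hile, hlo, hhi⟩ :=
    pvBisect_inv xs ideal hpair xs.length 0 (xs.length : Int) (by omega) (by omega)
      (by omega) (by omega)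
      (fun j hj hjlo => absurd hjlo (by omega))
      (fun j hj hjhi => absurd hjhi (by omega))
  have hbl : pvBisectLeft xs ideal = pvBisectAux xs ideal 0 (xs.length : Int) := rfl
  set i := pvBisectAux xs ideal 0 (xs.length : Int) with hi
  -- A side: the scan is pvGo from (none, limit); characterize it
  have hscan : pvScanA gaps pos ideal limit = pvGo pos ideal gaps (none, limit) := rfl
  have hstart : ((none : Option Int), limit)
      = ((none : Option Int), ideal - (none : Option Int).getD (ideal - limit)) := by
    simp
  have hchar := pvGo_char pos ideal (ideal - limit) gaps none
  rw [← hstart] at hchar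
  set fl := gaps.filter (fun g => decide (pos < g ∧ g < ideal)) with hfl
  set R := fl.foldl max ((none : Option Int).getD (ideal - limit)) with hR
  simp only [Option.getD_none] at hchar hR
  have hRub := (PySem.List.le_foldl_max fl (ideal - limit)).1
  have hRall := (PySem.List.le_foldl_max fl (ideal - limit)).2
  simp only [hbl, ← hi, hscan, hchar, ← hR]
  by_cases hip : i > 0
  · -- i > 0: xs[i-1] is the largest gap below ideal
    have hidx : (0:Int) ≤ i - 1 := by omega
    have hidx2 : i - 1 < (xs.length : Int) := by omega
    have hget : PySem.List.pyGet? xs (i - 1) = some xs[(i-1).toNat] :=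
      PySem.List.pyGet?_eq_some_getElem xs hidx hidx2
    set gstar := xs[(i-1).toNat]'(by omega) with hgs
    have hglt : gstar < ideal := hlo (i-1).toNat (by omega) (by omega)
    have hub : ∀ g ∈ gaps, g < ideal → g ≤ gstar := by
      intro g hg hgi
      obtain ⟨j, hj, hje⟩ := List.mem_iff_getElem.mp ((hmemx g).mpr hg)
      by_cases hji : (j : Int) < i
      · have hjle : j ≤ (i-1).toNat := by omega
        calc g = xs[j] := hje.symm
          _ ≤ xs[(i-1).toNat] :=
              PySem.List.sorted_id_getElem_mono gaps hjle (by show (i-1).toNat < xs.length; omega)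
          _ = gstar := rfl
      · exact absurd hgi (by have := hhi j hj (by omega); omega)
    have hmemR : R = ideal - limit ∨ R ∈ fl := PySem.List.foldl_max_mem fl (ideal - limit)
    simp only [if_pos hip, hget]
    by_cases hc : gstar > pos ∧ gstar > ideal - limit
    · -- B returns gstar; A's running max is gstar too
      have hgm : gstar ∈ fl := by
        rw [hfl]
        refine List.mem_filter.mpr ⟨(hmemx gstar).mp (by exact List.getElem_mem _), ?_⟩
        simp only [decide_eq_true_eq]
        exact ⟨hc.1, hglt⟩
      have hgR : gstar ≤ R := hRall gstar hgm
      have hReq : R = gstar := by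
        rcases hmemR with h | h
        · omega
        · have := List.mem_filter.mp h
          have hRgaps : R ∈ gaps := this.1
          have hRp : pos < R ∧ R < ideal := by simpa using this.2
          exact le_antisymm (hub R hRgaps hRp.2) hgR
      rw [if_pos hc, if_neg (by omega), hReq]
    · -- B returns ideal; A finds no qualifying gap
      have hReq : R = ideal - limit := by
        rcases hmemR with h | h
        · exact h
        · have := List.mem_filter.mp h
          have hRgaps : R ∈ gaps := this.1
          have hRp : pos < R ∧ R < ideal := by simpa using this.2
          have := hub R hRgaps hRp.2
          rcases not_and_or.mp hc with h2 | h2 <;> omega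
      rw [if_pos hReq, if_neg hc]
  · -- i = 0: no gap below ideal at all, both sides give ideal
    have hie : i = 0 := by omega
    have hfle : fl = [] := by
      rw [hfl]
      refine List.filter_eq_nil_iff.mpr ?_
      intro g hg
      obtain ⟨j, hj, hje⟩ := List.mem_iff_getElem.mp ((hmemx g).mpr hg)
      have := hhi j hj (by omega)
      simp only [decide_eq_true_eq]
      omega
    have hReq : R = ideal - limit := by rw [hR, hfle]; rfl
    rw [if_neg hip, if_pos hReq]

theorem pv_loops_eq (image_height page_height : Int) (gaps : List Int) :
    ∀ (fuel : Nat) (pos : Int) (acc : List (Int × Int)),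
      pvLoopA image_height page_height gaps fuel pos acc
        = pvLoopB image_height page_height (PySem.List.sorted gaps (fun g => g) false)
            (PySem.Int.floordiv page_height 4) fuel pos acc := by
  intro fuel
  induction fuel with
  | zero => intro pos acc; rfl
  | succ fuel ihf =>
    intro pos acc
    rw [pvLoopA, pvLoopB]
    by_cases hp : pos < image_height
    · simp only [if_pos hp]
      by_cases hend : pos + page_height ≥ image_height
      · have hm : min (pos + page_height) image_height = image_height := by omega
        rw [hm]
        rw [if_pos (le_refl _), if_pos hend]
      · have hm : min (pos + page_height) image_height = pos + page_height := by omega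
        rw [hm, if_neg (by omega), if_neg (by omega)]
        have hstep := pv_step_eq gaps pos (pos + page_height) (PySem.Int.floordiv page_height 4)
        simp only at hstep
        rw [hstep]
        exact ihf _ _
    · simp only [if_neg hp]

-- ===== VERDICT (by name: the statement is the Claim_ definition above) =====
theorem calculate_slices_spec : Claim_equal_calculate_slices := by
  intro image_height page_height content_gaps _
  show calculate_slices image_height page_height content_gaps
      = calculate_slices_alt image_height page_height content_gaps
  exact pv_loops_eq image_height page_height content_gaps _ 0 []
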